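-- pv_equiv track=rewrite | github.com/VasoMtsituri/hackerrank_challenges | validating_credit_card_numbers.py | check_for_length
-- ===== SOURCE A (Python) =====
-- def split_on_valid_sep(_str):
--     if '-' in _str:
--         parts = _str.split('-')
--     else:
--         parts = []
--
--     return parts
--
-- def check_for_length(_str):
--     parts = split_on_valid_sep(_str)
--
--     if parts:
--         if len(parts) != 4:
--             return False
--
--         for part in parts:
--             if len(part) != 4:
--                 return False
--     else:
--         if len(_str) != 16:
--             return False
--
--     return True
-- ===== SOURCE B (Python) =====
-- def _match_groups(s, n):
--     # True iff s is exactly n four-char dash-free groups joined by single dashes.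
--     if '-' in s[:4]:
--         return False
--     if n == 1:
--         return len(s) == 4
--     return len(s) > 4 and s[4] == '-' and _match_groups(s[5:], n - 1)
--
--
-- def check_for_length(_str):
--     if '-' not in _str:
--         return len(_str) == 16
--     return _match_groups(_str, 4)
-- ===== Notes on version B (the rewrite author's own statement) =====
-- stated objective: alternative
-- what changed: Instead of splitting the string on the dash separator into a parts list and then checking the number and lengths of parts, B never builds a list: it consumes the string positionally, checking a dash-free 4-char prefix and a dash at index 4, recursing on the remainder.
import Mathlib
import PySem

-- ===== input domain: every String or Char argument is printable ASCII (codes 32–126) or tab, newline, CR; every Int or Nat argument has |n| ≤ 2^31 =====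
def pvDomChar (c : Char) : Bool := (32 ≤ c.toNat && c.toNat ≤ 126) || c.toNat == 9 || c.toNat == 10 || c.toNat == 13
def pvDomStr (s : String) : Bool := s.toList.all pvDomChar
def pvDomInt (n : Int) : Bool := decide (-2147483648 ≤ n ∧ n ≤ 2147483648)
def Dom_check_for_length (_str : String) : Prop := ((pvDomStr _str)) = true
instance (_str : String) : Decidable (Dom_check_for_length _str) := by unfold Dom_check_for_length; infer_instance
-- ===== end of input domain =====

-- B replaces A's split-into-parts-then-count check by a positional matcher that consumes
-- dash-separated 4-char groups in place (objective: alternative; same return value everywhere).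

-- ===== PORT A =====
-- helper split_on_valid_sep; Python strings are modelled as List Char (PySem string ops live there)
def split_on_valid_sep (_str : String) : List (List Char) :=
  if PySem.Str.isIn "-" _str then PySem.Chars.splitOn _str.toList ['-'] else []

-- A's 'for part in parts' loop with its early 'return False'
def pvLenLoop : List (List Char) → Bool
  | [] => true
  | p :: ps => if p.length ≠ 4 then false else pvLenLoop ps

def check_for_length (_str : String) : Bool :=
  let parts := split_on_valid_sep _str
  if parts ≠ [] then
    if parts.length ≠ 4 then false
    else pvLenLoop parts
  else
    if PySem.Str.len _str ≠ 16 then false else true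

-- ===== PORT B =====
-- _match_groups(s, n) from Source B; the n = 0 clause is never reached from the entry call
-- (Source B's recursion likewise never reaches n = 0)
def pvMatchGroups : List Char → Nat → Bool
  | _, 0 => false
  | s, 1 =>
    if PySem.Chars.isIn ['-'] (PySem.Chars.slice s none (some 4)) then false
    else s.length == 4
  | s, (n+2) =>
    if PySem.Chars.isIn ['-'] (PySem.Chars.slice s none (some 4)) then false
    else decide (4 < s.length) && (PySem.List.pyGet? s 4 == some '-')
         && pvMatchGroups (PySem.Chars.slice s (some 5) none) (n+1)

def check_for_length_alt (_str : String) : Bool :=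
  if !(PySem.Str.isIn "-" _str) then PySem.Str.len _str == 16
  else pvMatchGroups _str.toList 4

-- ===== PRECONDITION & SPEC =====
def Spec_check_for_length (_str : String) (out : Bool) : Prop := out = check_for_length_alt _str
instance (_str : String) (out : Bool) : Decidable (Spec_check_for_length _str out) := by unfold Spec_check_for_length; infer_instance

-- ===== CLAIM (what is proved, stated in full; the proofs are below) =====
def Claim_equal_check_for_length : Prop := ∀ (_str : String), Dom_check_for_length _str → Spec_check_for_length _str (check_for_length _str)

-- ===== LEMMAS AND PROOFS =====

-- reference single-char split (proof-side only): sp l = l split on '-'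
def sp : List Char → List (List Char)
  | [] => [[]]
  | c :: rest =>
    if c = '-' then [] :: sp rest
    else match sp rest with
      | [] => [[c]]
      | g :: gs => (c :: g) :: gs

lemma sp_ne_nil (l : List Char) : sp l ≠ [] := by
  cases l with
  | nil => simp [sp]
  | cons c rest =>
    simp only [sp]
    split_ifs
    · simp
    · cases h : sp rest <;> simp

lemma modifyHead_id' (l : List (List Char)) : List.modifyHead (fun x => x) l = l := by
  cases l <;> simp

lemma splitOn_go_eq (l : List Char) : ∀ (fuel : Nat) (cur : List Char) (acc : List (List Char)),
    l.length < fuel →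
    PySem.Chars.splitOn.go ['-'] fuel l cur acc
      = acc.reverse ++ (sp l).modifyHead (cur.reverse ++ ·) := by
  induction l with
  | nil =>
    intro fuel cur acc hf
    cases fuel with
    | zero => omega
    | succ f => simp [PySem.Chars.splitOn.go, sp]
  | cons c rest ih =>
    intro fuel cur acc hf
    cases fuel with
    | zero => simp at hf
    | succ f =>
      have hrl : rest.length < f := by simpa using Nat.lt_of_succ_lt_succ hf
      by_cases hc : c = '-'
      · subst hc
        have hstep : PySem.Chars.splitOn.go ['-'] (f+1) ('-'::rest) cur acc
            = PySem.Chars.splitOn.go ['-'] f rest [] (cur.reverse :: acc) := by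
          rw [PySem.Chars.splitOn.go]
          simp [List.isPrefixOf]
        rw [hstep, ih f [] (cur.reverse :: acc) hrl]
        simp [sp, modifyHead_id']
      · have hstep : PySem.Chars.splitOn.go ['-'] (f+1) (c::rest) cur acc
            = PySem.Chars.splitOn.go ['-'] f rest (c :: cur) acc := by
          rw [PySem.Chars.splitOn.go]
          have : List.isPrefixOf ['-'] (c :: rest) = false := by
            simp [List.isPrefixOf]
            exact fun h => absurd h.symm hc
          simp [this]
        rw [hstep, ih f (c :: cur) acc hrl]
        have hne := sp_ne_nil rest
        cases hsp : sp rest with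
        | nil => exact absurd hsp hne
        | cons g gs => simp [sp, hc, hsp]

lemma splitOn_eq_sp (l : List Char) : PySem.Chars.splitOn l ['-'] = sp l := by
  have h := splitOn_go_eq l (l.length + 1) [] [] (by omega)
  rw [PySem.Chars.splitOn, h]
  simp [modifyHead_id']

lemma sp_of_not_mem {l : List Char} (h : '-' ∉ l) : sp l = [l] := by
  induction l with
  | nil => simp [sp]
  | cons c rest ih =>
    have hc : c ≠ '-' := by intro hc; exact h (hc ▸ List.mem_cons_self)
    have hrest : '-' ∉ rest := fun hm => h (List.mem_cons_of_mem _ hm)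
    simp [sp, hc, ih hrest]

lemma sp_append {g : List Char} (rest : List Char) (h : '-' ∉ g) :
    sp (g ++ '-' :: rest) = g :: sp rest := by
  induction g with
  | nil => simp [sp]
  | cons c gtl ih =>
    have hc : c ≠ '-' := by intro hc; exact h (hc ▸ List.mem_cons_self)
    have htl : '-' ∉ gtl := fun hm => h (List.mem_cons_of_mem _ hm)
    simp [sp, hc, ih htl]

lemma sp_length (l : List Char) : (sp l).length = l.count '-' + 1 := by
  induction l with
  | nil => simp [sp]
  | cons c rest ih =>
    by_cases hc : c = '-'
    · subst hc; simp [sp, ih]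
    · have hne := sp_ne_nil rest
      cases hsp : sp rest with
      | nil => exact absurd hsp hne
      | cons g gs =>
        have h2 : gs.length + 1 = rest.count '-' + 1 := by
          have := ih; rw [hsp] at this; simpa using this
        simp only [sp, if_neg hc, hsp, List.length_cons, List.count_cons]
        have hb : (c == '-') = false := by simp [hc]
        simp only [hb, Bool.false_eq_true, if_false]
        omega

lemma sp_first {l : List Char} (h : '-' ∈ l) :
    ∃ g rest, l = g ++ '-' :: rest ∧ '-' ∉ g := by
  induction l with
  | nil => simp at h
  | cons c rest ih =>
    by_cases hc : c = '-'
    · exact ⟨[], rest, by simp [hc], by simp⟩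
    · have hm : '-' ∈ rest := by
        rcases List.mem_cons.mp h with h1 | h1
        · exact absurd h1.symm hc
        · exact h1
      obtain ⟨g, r, hl, hg⟩ := ih hm
      refine ⟨c :: g, r, by simp [hl], ?_⟩
      intro hmem'
      rcases List.mem_cons.mp hmem' with h1 | h1
      · exact hc h1.symm
      · exact hg h1

lemma isIn_dash (l : List Char) : PySem.Chars.isIn ['-'] l = true ↔ '-' ∈ l := by
  rw [PySem.Chars.isIn_iff_infix, List.singleton_infix_iff]

lemma mg_iff (n : Nat) : ∀ l : List Char,
    pvMatchGroups l (n+1) = true ↔ ((sp l).length = n + 1 ∧ ∀ p ∈ sp l, p.length = 4) := by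
  induction n with
  | zero =>
    intro l
    rw [show (0:Nat)+1 = 1 from rfl]
    simp only [pvMatchGroups]
    rw [PySem.Chars.slice_eq_listSlice, PySem.List.slice_to _ (by norm_num : (0:Int) ≤ 4)]
    simp only [show ((4:Int).toNat) = 4 from rfl]
    by_cases hd : '-' ∈ List.take 4 l
    · rw [if_pos ((isIn_dash _).mpr hd)]
      constructor
      · intro h; simp at h
      · rintro ⟨hlen, _⟩
        have hcount : l.count '-' = 0 := by have := sp_length l; omega
        have hnm : '-' ∉ l := by
          intro hm
          have := List.count_pos_iff.mpr hm
          omega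
        exact absurd (List.mem_of_mem_take hd) hnm
    · rw [if_neg (by simp [isIn_dash, hd])]
      constructor
      · intro h
        have hlen : l.length = 4 := by simpa using h
        have hnm : '-' ∉ l := by
          rw [← List.take_of_length_le (le_of_eq hlen : l.length ≤ 4)]
          exact hd
        rw [sp_of_not_mem hnm]
        simp [hlen]
      · rintro ⟨hlen, hall⟩
        have hcount : l.count '-' = 0 := by have := sp_length l; omega
        have hnm : '-' ∉ l := by
          intro hm
          have := List.count_pos_iff.mpr hm
          omega
        rw [sp_of_not_mem hnm] at hall
        have : l.length = 4 := hall l (by simp)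
        simp [this]
  | succ m ih =>
    intro l
    rw [show m + 1 + 1 = m + 2 from rfl]
    simp only [pvMatchGroups]
    rw [PySem.Chars.slice_eq_listSlice, PySem.Chars.slice_eq_listSlice,
      PySem.List.slice_to _ (by norm_num : (0:Int) ≤ 4),
      PySem.List.slice_from _ (by norm_num : (0:Int) ≤ 5)]
    simp only [show ((4:Int).toNat) = 4 from rfl, show ((5:Int).toNat) = 5 from rfl]
    by_cases hd : '-' ∈ List.take 4 l
    · rw [if_pos ((isIn_dash _).mpr hd)]
      constructor
      · intro h; simp at h
      · rintro ⟨hlen, hall⟩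
        have hcount : 1 ≤ l.count '-' := by have := sp_length l; omega
        have hm : '-' ∈ l := List.count_pos_iff.mp (by omega)
        obtain ⟨g, rest, hl, hg⟩ := sp_first hm
        have hsp : sp l = g :: sp rest := by rw [hl]; exact sp_append rest hg
        have hg4 : g.length = 4 := hall g (by rw [hsp]; simp)
        have htake : List.take 4 l = g := by
          rw [hl]; exact List.take_left' hg4
        rw [htake] at hd
        exact absurd hd hg
    · rw [if_neg (by simp [isIn_dash, hd])]
      constructor
      · intro h
        simp only [Bool.and_eq_true, decide_eq_true_eq, beq_iff_eq] at h
        obtain ⟨⟨h4, hget⟩, hrec⟩ := h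
        have hget4 : l[(4:Nat)]? = some '-' := by
          rw [show ((4:Int)) = ((4:Nat) : Int) from by norm_num, PySem.List.pyGet?_natCast] at hget
          exact hget
        have hlt : (4:Nat) < l.length := h4
        have hgetE : l[(4:Nat)] = '-' := by
          rw [List.getElem?_eq_getElem hlt] at hget4
          exact Option.some_inj.mp hget4
        have hdrop : l = List.take 4 l ++ '-' :: List.drop 5 l := by
          conv_lhs => rw [← List.take_append_drop 4 l]
          congr 1
          rw [List.drop_eq_getElem_cons hlt, hgetE]
        have hsp : sp l = List.take 4 l :: sp (List.drop 5 l) := by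
          conv_lhs => rw [hdrop]
          exact sp_append _ hd
        have hrec' := (ih (List.drop 5 l)).mp hrec
        refine ⟨?_, ?_⟩
        · rw [hsp]; simp [hrec'.1]
        · intro p hp
          rw [hsp] at hp
          rcases List.mem_cons.mp hp with hp | hp
          · subst hp; simp [List.length_take]; omega
          · exact hrec'.2 p hp
      · rintro ⟨hlen, hall⟩
        have hcount : 1 ≤ l.count '-' := by have := sp_length l; omega
        have hm : '-' ∈ l := List.count_pos_iff.mp (by omega)
        obtain ⟨g, rest, hl, hg⟩ := sp_first hm
        have hsp : sp l = g :: sp rest := by rw [hl]; exact sp_append rest hg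
        have hg4 : g.length = 4 := hall g (by rw [hsp]; simp)
        have hlen4 : 4 < l.length := by rw [hl]; simp [hg4]
        have hget : PySem.List.pyGet? l 4 = some '-' := by
          rw [show ((4:Int)) = ((4:Nat) : Int) from by norm_num, PySem.List.pyGet?_natCast]
          rw [hl, List.getElem?_append_right (by omega : g.length ≤ 4)]
          simp [hg4]
        have hdrop5 : List.drop 5 l = rest := by
          rw [hl, show g ++ '-' :: rest = (g ++ ['-']) ++ rest from by simp,
            show (5:Nat) = (g ++ ['-']).length from by simp [hg4], List.drop_left]
        have hrest : (sp rest).length = m + 1 ∧ ∀ p ∈ sp rest, p.length = 4 := by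
          constructor
          · have := hlen; rw [hsp] at this; simpa using this
          · intro p hp; exact hall p (by rw [hsp]; exact List.mem_cons_of_mem _ hp)
        have hrec : pvMatchGroups (List.drop 5 l) (m + 1) = true := by
          rw [hdrop5]; exact (ih rest).mpr hrest
        simp only [Bool.and_eq_true, decide_eq_true_eq, beq_iff_eq]
        exact ⟨⟨hlen4, hget⟩, hrec⟩

lemma lenLoop_eq_all (ps : List (List Char)) :
    pvLenLoop ps = ps.all (fun p => p.length == 4) := by
  induction ps with
  | nil => simp [pvLenLoop]
  | cons p tl ih =>
    by_cases h : p.length = 4 <;> simp [pvLenLoop, h, ih]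

-- ===== VERDICT (by name: the statement is the Claim_ definition above) =====
theorem check_for_length_spec : Claim_equal_check_for_length := by
  intro _str _dom
  unfold Spec_check_for_length check_for_length check_for_length_alt split_on_valid_sep
  by_cases hin : PySem.Str.isIn "-" _str = true
  · have hmem : '-' ∈ _str.toList := (isIn_dash _).mp (by simpa using hin)
    simp only [hin, Bool.not_true, Bool.false_eq_true, if_true, if_false]
    rw [splitOn_eq_sp, if_pos (sp_ne_nil _str.toList)]
    have hiff := mg_iff 3 _str.toList
    by_cases h4 : (sp _str.toList).length = 4
    · rw [if_neg (by simp [h4]), lenLoop_eq_all]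
      cases hb : pvMatchGroups _str.toList 4 with
      | false =>
        cases hA : (sp _str.toList).all (fun p => p.length == 4) with
        | false => rfl
        | true =>
          exfalso
          have hT : pvMatchGroups _str.toList 4 = true := by
            apply hiff.mpr
            refine ⟨h4, fun p hp => ?_⟩
            simpa using List.all_eq_true.mp hA p hp
          rw [hT] at hb
          exact absurd hb (by simp)
      | true =>
        obtain ⟨_, hall⟩ := hiff.mp hb
        exact List.all_eq_true.mpr (fun p hp => by simp [hall p hp])
    · rw [if_pos h4]
      cases hb : pvMatchGroups _str.toList 4 with
      | false => rfl
      | true => exact absurd (hiff.mp hb).1 h4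
  · have hin' : PySem.Str.isIn "-" _str = false := by simpa using hin
    simp only [hin', Bool.not_false, Bool.false_eq_true, if_true, if_false]
    simp only [ne_eq, not_true_eq_false, if_false]
    simp [Bool.beq_eq_decide_eq]
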